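-- pv_equiv track=rewrite | github.com/dhsong95/programmers-algorithm-challenges | 2020 KAKAO BLIND RECRUITMENT/외벽 점검.py | total_fix
-- ===== SOURCE A (Python) =====
-- def total_fix(weak, dist):
--     weak_index = 0
--     dist_index = 0
--
--     while weak_index < len(weak) and dist_index < len(dist):
--         coverage = weak[weak_index] + dist[dist_index]
--
--         while weak_index < len(weak)-1 and coverage >= weak[weak_index+1]:
--             weak_index += 1
--
--         dist_index += 1
--         weak_index += 1
--
--     return weak_index >= len(weak)
-- ===== SOURCE B (Python) =====
-- def total_fix(weak, dist):
--     stack = weak[::-1]          # residual weak points; next one on top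
--     for d in dist:
--         if not stack:
--             return True
--         bound = stack.pop() + d
--         while stack and stack[-1] <= bound:
--             stack.pop()
--     return not stack
-- ===== Notes on version B (the rewrite author's own statement) =====
-- stated objective: alternative
-- what changed: Inverts the decomposition: the loop is driven by dist, maintaining the residual weak points as a stack (reversed list, O(1) pops) that each step pops its covered top elements, instead of A's nested index-based while loops walking weak and consuming dist on demand.
import Mathlib
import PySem

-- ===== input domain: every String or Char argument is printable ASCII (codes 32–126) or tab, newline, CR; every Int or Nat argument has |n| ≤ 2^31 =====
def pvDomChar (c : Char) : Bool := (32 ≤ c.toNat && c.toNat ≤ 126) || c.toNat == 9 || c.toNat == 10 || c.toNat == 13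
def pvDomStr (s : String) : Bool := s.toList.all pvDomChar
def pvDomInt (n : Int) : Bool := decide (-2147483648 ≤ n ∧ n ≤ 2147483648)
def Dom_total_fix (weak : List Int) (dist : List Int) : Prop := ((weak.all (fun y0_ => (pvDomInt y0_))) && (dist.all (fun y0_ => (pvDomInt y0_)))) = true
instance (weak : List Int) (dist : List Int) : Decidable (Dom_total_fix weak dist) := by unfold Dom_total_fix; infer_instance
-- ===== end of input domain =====

-- B inverts the decomposition: its loop is driven by dist, keeping the residual weak
-- points on a stack popped while covered (objective: alternative; same cost class).

-- ===== PORT A =====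
-- Inner while loop of A: advances weak_index while the next weak point is covered.
-- All list indices in A are non-negative and in range, so getD is exact here.
def innerA (weak : List Int) (coverage : Int) (wi : Nat) : Nat :=
  if wi < weak.length - 1 ∧ coverage ≥ weak.getD (wi + 1) 0 then
    innerA weak coverage (wi + 1)
  else wi
termination_by weak.length - wi
decreasing_by omega

-- Outer while loop of A over (weak_index, dist_index).
def outerA (weak : List Int) (dist : List Int) (wi di : Nat) : Bool :=
  if wi < weak.length ∧ di < dist.length then
    let coverage := weak.getD wi 0 + dist.getD di 0
    outerA weak dist (innerA weak coverage wi + 1) (di + 1)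
  else decide (wi ≥ weak.length)
termination_by dist.length - di
decreasing_by omega

def total_fix (weak : List Int) (dist : List Int) : Bool := outerA weak dist 0 0

-- ===== PORT B =====
-- B's stack is encoded head = top; Python's `weak[::-1]` with its top at the END is
-- therefore the list `weak` itself (head = weak[0] = top). `pop()` takes the head,
-- `stack[-1]` peeks at the head.
-- B's inner while loop: pop stack elements while covered (`stack and stack[-1] <= bound`).
def popCovered (bound : Int) : List Int → List Int
  | [] => []
  | x :: xs => if x > bound then x :: xs else popCovered bound xs

-- B's for-loop over dist carrying the residual stack; `if not stack: return True`,
-- `bound = stack.pop() + d`, and the final `return not stack`.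
def goB : List Int → List Int → Bool
  | stack, [] => stack.isEmpty
  | [], _ :: _ => true
  | w :: stack, d :: ds => goB (popCovered (w + d) stack) ds

def total_fix_alt (weak : List Int) (dist : List Int) : Bool := goB weak dist

-- ===== PRECONDITION & SPEC =====
def Spec_total_fix (weak : List Int) (dist : List Int) (out : Bool) : Prop := out = total_fix_alt weak dist
instance (weak : List Int) (dist : List Int) (out : Bool) : Decidable (Spec_total_fix weak dist out) := by unfold Spec_total_fix; infer_instance

-- ===== CLAIM (what is proved, stated in full; the proofs are below) =====
def Claim_equal_total_fix : Prop := ∀ (weak : List Int) (dist : List Int), Dom_total_fix weak dist → Spec_total_fix weak dist (total_fix weak dist)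

-- ===== LEMMAS AND PROOFS =====

theorem innerA_ge (weak : List Int) (c : Int) (wi : Nat) : wi ≤ innerA weak c wi := by
  unfold innerA
  split
  · have := innerA_ge weak c (wi + 1)
    omega
  · exact Nat.le_refl _
termination_by weak.length - wi
decreasing_by omega

theorem innerA_lt (weak : List Int) (c : Int) (wi : Nat) (h : wi < weak.length) :
    innerA weak c wi < weak.length := by
  unfold innerA
  split
  · exact innerA_lt weak c (wi + 1) (by omega)
  · exact h
termination_by weak.length - wi
decreasing_by omega

theorem drop_getD (weak : List Int) (i : Nat) (h : i < weak.length) :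
    weak.drop i = weak.getD i 0 :: weak.drop (i + 1) := by
  rw [List.getD_eq_getElem?_getD, List.getElem?_eq_getElem h]
  exact List.drop_eq_getElem_cons h

-- B's covered-pop loop computes exactly the suffix A's inner while loop stops at.
theorem skip_lemma (weak : List Int) (c : Int) (wi : Nat) (h : wi < weak.length) :
    popCovered c (weak.drop (wi + 1)) = weak.drop (innerA weak c wi + 1) := by
  unfold innerA
  split
  · rename_i hc
    rw [drop_getD weak (wi + 1) (by omega), popCovered, if_neg (by omega)]
    exact skip_lemma weak c (wi + 1) (by omega)
  · rename_i hc
    rcases Nat.lt_or_ge (wi + 1) weak.length with hlt | hge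
    · have huncov : weak.getD (wi + 1) 0 > c := by
        by_contra hnot
        exact hc ⟨by omega, by omega⟩
      rw [drop_getD weak (wi + 1) hlt, popCovered, if_pos huncov]
    · rw [List.drop_eq_nil_of_le (by omega : weak.length ≤ wi + 1)]
      rfl
termination_by weak.length - wi
decreasing_by omega

theorem main_lemma (weak dist : List Int) (wi di : Nat) (h : wi ≤ weak.length) :
    outerA weak dist wi di = goB (weak.drop wi) (dist.drop di) := by
  rcases Nat.lt_or_ge wi weak.length with hlt | hge
  · rcases Nat.lt_or_ge di dist.length with hdi | hdi
    · unfold outerA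
      rw [if_pos ⟨hlt, hdi⟩]
      show outerA weak dist (innerA weak (weak.getD wi 0 + dist.getD di 0) wi + 1) (di + 1) =
        goB (weak.drop wi) (dist.drop di)
      rw [drop_getD weak wi hlt, drop_getD dist di hdi]
      show _ = goB (popCovered (weak.getD wi 0 + dist.getD di 0) (weak.drop (wi + 1)))
        (dist.drop (di + 1))
      rw [skip_lemma weak _ wi hlt]
      have h1 := innerA_lt weak (weak.getD wi 0 + dist.getD di 0) wi hlt
      exact main_lemma weak dist (innerA weak (weak.getD wi 0 + dist.getD di 0) wi + 1) (di + 1)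
        (by omega)
    · unfold outerA
      rw [if_neg (by omega), List.drop_eq_nil_of_le hdi, drop_getD weak wi hlt]
      show decide (wi ≥ weak.length) = List.isEmpty _
      simp only [List.isEmpty_cons, decide_eq_false_iff_not]
      omega
  · unfold outerA
    rw [if_neg (by omega), List.drop_eq_nil_of_le hge]
    rcases Nat.lt_or_ge di dist.length with hdi | hdi
    · rw [drop_getD dist di hdi]
      show decide (wi ≥ weak.length) = true
      simp only [decide_eq_true_eq]
      omega
    · rw [List.drop_eq_nil_of_le hdi]
      show decide (wi ≥ weak.length) = List.isEmpty ([] : List Int)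
      simp only [List.isEmpty_nil, decide_eq_true_eq]
      omega
termination_by weak.length - wi
decreasing_by
  have h2 := innerA_ge weak (weak.getD wi 0 + dist.getD di 0) wi
  omega

-- ===== VERDICT (by name: the statement is the Claim_ definition above) =====
theorem total_fix_spec : Claim_equal_total_fix := by
  intro weak dist _
  unfold Spec_total_fix total_fix total_fix_alt
  simpa using main_lemma weak dist 0 0 (Nat.zero_le _)
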